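-- pv_equiv track=rewrite | github.com/etosomsemnefiltry/goit-pnc-hw-02 | task_1.py | calculate_possible_key_lengths
-- ===== SOURCE A (Python) =====
-- from collections import Counter
--
-- def calculate_possible_key_lengths(sequences):
--     distances = []
--     for seq, positions in sequences.items():
--         if len(positions) > 1:
--             for i in range(1, len(positions)):
--                 distances.append(positions[i] - positions[i-1])
--
--     if not distances:
--         return []
--
--     factors = []
--     for d in distances:
--         for i in range(2, d + 1):
--             if d % i == 0:
--                 factors.append(i)
--
--     factor_counts = Counter(factors)
--     most_common = [length for length, _ in factor_counts.most_common(5)]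
--     return most_common
-- ===== SOURCE B (Python) =====
-- def _divisors(d):
--     """Ascending divisors of d in [2, d], by trial division up to sqrt(d)."""
--     if d < 2:
--         return []
--     small, large = [], []
--     i = 2
--     while i * i <= d:
--         if d % i == 0:
--             small.append(i)
--             if d // i != i:
--                 large.append(d // i)
--         i += 1
--     large.reverse()
--     return small + large + [d]
--
--
-- def calculate_possible_key_lengths(sequences):
--     counts = {}
--     for positions in sequences.values():
--         for a, b in zip(positions, positions[1:]):
--             for f in _divisors(b - a):
--                 counts[f] = counts.get(f, 0) + 1
--     top = sorted(counts.items(), key=lambda kv: kv[1], reverse=True)[:5]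
--     return [f for f, _ in top]
-- ===== Notes on version B (the rewrite author's own statement) =====
-- stated objective: faster
-- what changed: B finds each distance's divisors by trial division up to sqrt(d), collecting divisor pairs in ascending order, and counts them directly into a dict over zipped consecutive-position pairs, instead of A's scan of every integer from 2 to d and a flat factors list fed to Counter.
import Mathlib
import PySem

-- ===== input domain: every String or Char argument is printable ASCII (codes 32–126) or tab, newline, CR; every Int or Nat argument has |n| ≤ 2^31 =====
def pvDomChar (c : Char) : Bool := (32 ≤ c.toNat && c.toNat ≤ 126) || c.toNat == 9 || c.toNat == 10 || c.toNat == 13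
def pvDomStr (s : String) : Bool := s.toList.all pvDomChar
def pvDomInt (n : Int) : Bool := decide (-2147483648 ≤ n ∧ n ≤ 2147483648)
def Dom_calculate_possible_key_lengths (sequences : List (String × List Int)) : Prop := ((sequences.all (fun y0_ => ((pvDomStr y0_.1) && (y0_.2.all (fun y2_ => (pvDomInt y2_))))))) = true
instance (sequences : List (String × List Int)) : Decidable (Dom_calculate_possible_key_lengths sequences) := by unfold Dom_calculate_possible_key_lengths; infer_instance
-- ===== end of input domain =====

-- B replaces A's O(d) divisor scan per distance by trial division up to sqrt(d)
-- (collecting divisor pairs in ascending order) and counts divisors into a dict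
-- directly instead of materialising the flat factors list (objective: faster).

-- ===== PORT A =====
def calculate_possible_key_lengths (sequences : List (String × List Int)) : List Int :=
  let distances := sequences.foldl (fun distances sp =>
      let positions := sp.2
      if 1 < PySem.List.len positions then
        (PySem.List.pyRange 1 (PySem.List.len positions) 1).foldl
          (fun ds i => ds ++ [PySem.List.pyGetD positions i 0 - PySem.List.pyGetD positions (i - 1) 0])
          distances
      else distances) []
  if distances = [] then []
  else
    let factors := distances.foldl (fun fs d =>
        (PySem.List.pyRange 2 (d + 1) 1).foldl
          (fun fs i => if PySem.Int.mod d i = 0 then fs ++ [i] else fs) fs) []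
    let factor_counts := PySem.Dict.counter factors
    -- most_common(5) = sorted(items, key=count, reverse=True)[:5]
    ((PySem.List.sorted factor_counts.items (fun kv => kv.2) true).take 5).map (fun kv => kv.1)

-- ===== PORT B =====
-- while i*i <= d: collect i (ascending) and d//i (descending) divisor pairs.
-- fuel (= d, an upper bound on the iteration count) makes the recursion structural;
-- it is never exhausted.
def pvTrial (d : Int) (fuel : Nat) (i : Int) (small large : List Int) : List Int × List Int :=
  match fuel with
  | 0 => (small, large)
  | n + 1 =>
    if i * i ≤ d then
      (if PySem.Int.mod d i = 0 then
        pvTrial d n (i + 1) (small ++ [i])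
          (if PySem.Int.floordiv d i ≠ i then large ++ [PySem.Int.floordiv d i] else large)
      else pvTrial d n (i + 1) small large)
    else (small, large)

def pvDivisors (d : Int) : List Int :=
  if d < 2 then []
  else
    let sl := pvTrial d d.toNat 2 [] []
    sl.1 ++ sl.2.reverse ++ [d]

def calculate_possible_key_lengths_alt (sequences : List (String × List Int)) : List Int :=
  let counts := sequences.foldl (fun counts sp =>
      (sp.2.zip (PySem.List.slice sp.2 (some 1) none)).foldl
        (fun counts ab =>
          (pvDivisors (ab.2 - ab.1)).foldl
            (fun counts f => counts.insert f (counts.getD f 0 + 1)) counts) counts)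
    (PySem.Dict.empty : PySem.Dict Int Int)
  ((PySem.List.sorted counts.items (fun kv => kv.2) true).take 5).map (fun kv => kv.1)

-- ===== PRECONDITION & SPEC =====
def Spec_calculate_possible_key_lengths (sequences : List (String × List Int)) (out : List Int) : Prop := out = calculate_possible_key_lengths_alt sequences
instance (sequences : List (String × List Int)) (out : List Int) : Decidable (Spec_calculate_possible_key_lengths sequences out) := by unfold Spec_calculate_possible_key_lengths; infer_instance

-- ===== CLAIM (what is proved, stated in full; the proofs are below) =====
def Claim_equal_calculate_possible_key_lengths : Prop := ∀ (sequences : List (String × List Int)), Dom_calculate_possible_key_lengths sequences → Spec_calculate_possible_key_lengths sequences (calculate_possible_key_lengths sequences)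

-- ===== LEMMAS AND PROOFS =====

-- A's divisor list for one distance d
def pvFA (d : Int) : List Int :=
  (PySem.List.pyRange 2 (d + 1) 1).filter (fun i => decide (PySem.Int.mod d i = 0))

-- integer square root bound used to describe the trial-division loop
def pvR (d : Int) : Int := (d.toNat.sqrt : Int)

theorem pvR_sq_le (d : Int) (hd : 2 ≤ d) : pvR d * pvR d ≤ d := by
  have h := Nat.sqrt_le' d.toNat
  rw [pow_two] at h
  have : ((d.toNat.sqrt * d.toNat.sqrt : Nat) : Int) ≤ ((d.toNat : Nat) : Int) := by exact_mod_cast h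
  simpa [pvR, Int.toNat_of_nonneg (by omega : (0:Int) ≤ d)] using this

theorem pvR_lt_sq (d : Int) (hd : 2 ≤ d) : d < (pvR d + 1) * (pvR d + 1) := by
  have h := Nat.lt_succ_sqrt' d.toNat
  rw [pow_two] at h
  have : ((d.toNat : Nat) : Int) < (((d.toNat.sqrt + 1) * (d.toNat.sqrt + 1) : Nat) : Int) := by
    exact_mod_cast h
  simp only [Int.toNat_of_nonneg (by omega : (0:Int) ≤ d)] at this
  push_cast at this
  simpa [pvR] using this

theorem pvR_pos (d : Int) (hd : 2 ≤ d) : 1 ≤ pvR d := by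
  by_contra h
  have h0 : 0 ≤ pvR d := by simp [pvR]
  have := pvR_lt_sq d hd
  nlinarith

theorem pvR_lt (d : Int) (hd : 2 ≤ d) : pvR d < d := by
  by_contra h
  have h1 := pvR_pos d hd
  have h2 := pvR_sq_le d hd
  nlinarith

-- closed form of the trial-division loop (fuel large enough to finish the loop)
theorem pvTrial_eq (d : Int) (hd : 2 ≤ d) : ∀ (fuel : Nat) (i : Int), 2 ≤ i →
    (pvR d + 1 - i).toNat ≤ fuel →
    ∀ (small large : List Int),
    pvTrial d fuel i small large =
      (small ++ (PySem.List.pyRange i (pvR d + 1) 1).filter (fun j => decide (d % j = 0)),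
       large ++ ((PySem.List.pyRange i (pvR d + 1) 1).filter
                   (fun j => decide (d % j = 0 ∧ d / j ≠ j))).map (fun j => d / j)) := by
  intro fuel
  induction fuel with
  | zero =>
    intro i hi hn small large
    have hri : pvR d + 1 ≤ i := by omega
    rw [pvTrial, PySem.List.pyRange_one_eq_nil hri]
    simp
  | succ n ih =>
    intro i hi hn small large
    rw [pvTrial]
    by_cases hle : i * i ≤ d
    · have hir : i ≤ pvR d := by
        by_contra h
        have h2 := pvR_lt_sq d hd
        have h0 : 1 ≤ pvR d := pvR_pos d hd
        push_neg at h
        nlinarith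
      have hpos : (0:Int) < i := by omega
      rw [if_pos hle, PySem.List.pyRange_one_cons (by omega : i < pvR d + 1)]
      rw [PySem.Int.mod_eq_emod_of_pos hpos, PySem.Int.floordiv_eq_ediv_of_pos hpos]
      by_cases hm : d % i = 0
      · have hdvd : i ∣ d := (PySem.Int.emod_eq_zero_iff_dvd d i).mp hm
        rw [if_pos hm, ih (i + 1) (by omega) (by omega)]
        by_cases hq : d / i ≠ i
        · rw [if_pos hq]
          simp [hdvd, hq]
        · rw [if_neg hq]
          simp only [ne_eq, not_not] at hq
          simp [hdvd, hq]
      · have hdvd : ¬ i ∣ d := fun h => hm ((PySem.Int.emod_eq_zero_iff_dvd d i).mpr h)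
        rw [if_neg hm, ih (i + 1) (by omega) (by omega)]
        simp [hdvd]
    · have hri : pvR d + 1 ≤ i := by
        by_contra h
        push_neg at h
        have h2 := pvR_sq_le d hd
        have h0 : 1 ≤ pvR d := pvR_pos d hd
        nlinarith
      rw [if_neg hle, PySem.List.pyRange_one_eq_nil hri]
      simp

-- the middle segment: divisors strictly between sqrt(d) and d, ascending
theorem pvMid_eq (d : Int) (hd : 2 ≤ d) :
    (PySem.List.pyRange (pvR d + 1) d 1).filter (fun j => decide (d % j = 0)) =
      (((PySem.List.pyRange 2 (pvR d + 1) 1).filter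
          (fun j => decide (d % j = 0 ∧ d / j ≠ j))).map (fun j => d / j)).reverse := by
  have hr1 := pvR_pos d hd
  have hr2 := pvR_sq_le d hd
  have hr3 := pvR_lt_sq d hd
  have hrd := pvR_lt d hd
  have hA : ((PySem.List.pyRange (pvR d + 1) d 1).filter
      (fun j => decide (d % j = 0))).Pairwise (· < ·) :=
    (PySem.List.pairwise_lt_pyRange_one _ _).filter _
  have hBmap : (((PySem.List.pyRange 2 (pvR d + 1) 1).filter
      (fun j => decide (d % j = 0 ∧ d / j ≠ j))).map (fun j => d / j)).Pairwise (· > ·) := by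
    rw [List.pairwise_map]
    have base : ((PySem.List.pyRange 2 (pvR d + 1) 1).filter
        (fun j => decide (d % j = 0 ∧ d / j ≠ j))).Pairwise (· < ·) :=
      (PySem.List.pairwise_lt_pyRange_one _ _).filter _
    refine base.imp_of_mem ?_
    intro a b ha hb hab
    obtain ⟨ha1, ha2⟩ := List.mem_filter.mp ha
    obtain ⟨hb1, hb2⟩ := List.mem_filter.mp hb
    rw [PySem.List.mem_pyRange_one] at ha1 hb1
    simp only [decide_eq_true_eq] at ha2 hb2
    have hda : a ∣ d := (PySem.Int.emod_eq_zero_iff_dvd d a).mp ha2.1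
    have hdb : b ∣ d := (PySem.Int.emod_eq_zero_iff_dvd d b).mp hb2.1
    have hma : d / a * a = d := Int.ediv_mul_cancel hda
    have hmb : d / b * b = d := Int.ediv_mul_cancel hdb
    have hbpos : (1:Int) ≤ d / b := by
      rcases Int.lt_or_le (d / b) 1 with h | h
      · exfalso; nlinarith
      · exact h
    show d / b < d / a
    nlinarith
  have hB : ((((PySem.List.pyRange 2 (pvR d + 1) 1).filter
      (fun j => decide (d % j = 0 ∧ d / j ≠ j))).map (fun j => d / j)).reverse).Pairwise (· < ·) := by
    rw [List.pairwise_reverse]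
    exact hBmap
  have hmem : ∀ x, x ∈ (PySem.List.pyRange (pvR d + 1) d 1).filter (fun j => decide (d % j = 0)) ↔
      x ∈ (((PySem.List.pyRange 2 (pvR d + 1) 1).filter
        (fun j => decide (d % j = 0 ∧ d / j ≠ j))).map (fun j => d / j)).reverse := by
    intro x
    simp only [List.mem_reverse, List.mem_map, List.mem_filter, PySem.List.mem_pyRange_one,
      decide_eq_true_eq]
    constructor
    · rintro ⟨⟨hx1, hx2⟩, hx3⟩
      have hdx : x ∣ d := (PySem.Int.emod_eq_zero_iff_dvd d x).mp hx3
      have hmx : d / x * x = d := Int.ediv_mul_cancel hdx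
      have h1 : (1:Int) ≤ d / x := by
        rcases Int.lt_or_le (d / x) 1 with h | h
        · exfalso; nlinarith
        · exact h
      have h2 : (2:Int) ≤ d / x := by
        rcases Int.lt_or_le (d / x) 2 with h | h
        · exfalso
          have hx0 : d / x = 1 := by omega
          rw [hx0] at hmx
          omega
        · exact h
      have h3 : d / x < pvR d + 1 := by
        by_contra h
        push_neg at h
        nlinarith
      have hqx : d / (d / x) = x :=
        Int.ediv_eq_of_eq_mul_left (by omega) (by rw [Int.mul_comm]; exact hmx.symm)
      refine ⟨d / x, ⟨⟨h2, h3⟩, ⟨?_, ?_⟩⟩, hqx⟩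
      · exact (PySem.Int.emod_eq_zero_iff_dvd d (d / x)).mpr (Int.ediv_dvd_of_dvd hdx)
      · rw [hqx]; omega
    · rintro ⟨j, ⟨⟨hj1, hj2⟩, ⟨hjm, hjq⟩⟩, rfl⟩
      have hdj : j ∣ d := (PySem.Int.emod_eq_zero_iff_dvd d j).mp hjm
      have hmj : d / j * j = d := Int.ediv_mul_cancel hdj
      have h1 : (1:Int) ≤ d / j := by
        rcases Int.lt_or_le (d / j) 1 with h | h
        · exfalso; nlinarith
        · exact h
      have hlt : j < d / j := by
        rcases Int.lt_or_le j (d / j) with h | h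
        · exact h
        · exfalso
          rcases lt_or_eq_of_le h with h' | h'
          · nlinarith
          · exact hjq h'
      refine ⟨⟨?_, ?_⟩, ?_⟩
      · by_contra h
        push_neg at h
        nlinarith
      · nlinarith
      · exact (PySem.Int.emod_eq_zero_iff_dvd d (d / j)).mpr (Int.ediv_dvd_of_dvd hdj)
  have hperm := (List.perm_ext_iff_of_nodup
    (hA.imp fun h => ne_of_lt h) (hB.imp fun h => ne_of_lt h)).mpr hmem
  exact hperm.eq_of_pairwise (fun a b _ _ h1 h2 => absurd h1 (not_lt_of_gt h2)) hA hB

-- the key lemma: sqrt trial division produces exactly A's ascending divisor list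
theorem pvDivisors_eq_fA (d : Int) : pvDivisors d = pvFA d := by
  by_cases hd : d < 2
  · rw [pvDivisors, if_pos hd, pvFA, PySem.List.pyRange_one_eq_nil (by omega : d + 1 ≤ 2)]
    rfl
  · push_neg at hd
    have hr1 := pvR_pos d hd
    have hrd := pvR_lt d hd
    have hfa : pvFA d = (PySem.List.pyRange 2 (d + 1) 1).filter (fun j => decide (d % j = 0)) := by
      apply List.filter_congr
      intro x hx
      rw [PySem.List.mem_pyRange_one] at hx
      rw [PySem.Int.mod_eq_emod_of_pos (by omega : (0:Int) < x)]
    rw [pvDivisors, if_neg (by omega), hfa]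
    rw [PySem.List.pyRange_one_append 2 (pvR d + 1) (d + 1) (by omega) (by omega),
      PySem.List.pyRange_one_append (pvR d + 1) d (d + 1) (by omega) (by omega),
      PySem.List.pyRange_one_singleton d]
    rw [List.filter_append, List.filter_append]
    have hdd : List.filter (fun j => decide (d % j = 0)) [d] = [d] := by
      simp
    rw [hdd, pvMid_eq d hd,
      pvTrial_eq d hd d.toNat 2 le_rfl (by omega) [] []]
    simp

-- ---- plumbing: closed forms of A's and B's accumulation loops ----

-- consecutive differences of a positions list
def pvDiffs (xs : List Int) : List Int := (xs.zip xs.tail).map (fun ab => ab.2 - ab.1)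

theorem pvMap_diffs (xs : List Int) :
    (PySem.List.pyRange 1 (PySem.List.len xs) 1).map
      (fun i => PySem.List.pyGetD xs i 0 - PySem.List.pyGetD xs (i - 1) 0) = pvDiffs xs := by
  apply List.ext_getElem
  · simp [pvDiffs, PySem.List.len_eq, PySem.List.length_pyRange_one]
  · intro k h1 h2
    simp only [List.getElem_map, PySem.List.getElem_pyRange_one, pvDiffs, List.getElem_zip]
    have hlen : k + 1 < xs.length := by
      simp [PySem.List.len_eq, PySem.List.length_pyRange_one] at h1
      omega
    have e1 : (1 : Int) + k = ((k + 1 : Nat) : Int) := by push_cast; ring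
    have e2 : (1 : Int) + k - 1 = ((k : Nat) : Int) := by ring
    rw [e2, e1, PySem.List.pyGetD_natCast, PySem.List.pyGetD_natCast]
    rw [List.getD_eq_getElem xs 0 hlen, List.getD_eq_getElem xs 0 (by omega)]
    simp [List.getElem_tail]

theorem pvDiffs_nil_of_short (xs : List Int) (h : xs.length ≤ 1) : pvDiffs xs = [] := by
  match xs, h with
  | [], _ => rfl
  | [a], _ => rfl

theorem pvDistances_eq (sequences : List (String × List Int)) (init : List Int) :
    sequences.foldl (fun distances sp =>
        if 1 < PySem.List.len sp.2 then
          (PySem.List.pyRange 1 (PySem.List.len sp.2) 1).foldl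
            (fun ds i => ds ++ [PySem.List.pyGetD sp.2 i 0 - PySem.List.pyGetD sp.2 (i - 1) 0])
            distances
        else distances) init
      = init ++ sequences.flatMap (fun sp => pvDiffs sp.2) := by
  induction sequences generalizing init with
  | nil => simp
  | cons sp rest ih =>
    rw [List.foldl_cons, List.flatMap_cons, ih]
    by_cases hg : 1 < PySem.List.len sp.2
    · rw [if_pos hg, PySem.List.foldl_append_singleton_eq_map, pvMap_diffs, List.append_assoc]
    · rw [if_neg hg]
      rw [pvDiffs_nil_of_short sp.2 (by simp [PySem.List.len_eq] at hg; omega)]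
      simp

theorem pvFactors_eq (distances : List Int) (init : List Int) :
    distances.foldl (fun fs d =>
        (PySem.List.pyRange 2 (d + 1) 1).foldl
          (fun fs i => if PySem.Int.mod d i = 0 then fs ++ [i] else fs) fs) init
      = init ++ distances.flatMap pvFA := by
  have hstep : (fun fs d =>
      (PySem.List.pyRange 2 (d + 1) 1).foldl
        (fun fs i => if PySem.Int.mod d i = 0 then fs ++ [i] else fs) fs)
      = fun (fs : List Int) d => fs ++ pvFA d := by
    funext fs d
    exact PySem.List.foldl_append_ite_eq_filter _ _ _
  rw [hstep, PySem.List.foldl_append_eq_flatMap]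

theorem pvFoldFlat {α β γ : Type} (l : List α) (g : α → List β) (f : γ → β → γ) (c : γ) :
    l.foldl (fun c x => (g x).foldl f c) c = (l.flatMap g).foldl f c := by
  induction l generalizing c with
  | nil => rfl
  | cons x rest ih => rw [List.foldl_cons, List.flatMap_cons, List.foldl_append, ih]

theorem pvCounts_eq (sequences : List (String × List Int)) :
    sequences.foldl (fun counts sp =>
        (sp.2.zip (PySem.List.slice sp.2 (some 1) none)).foldl
          (fun counts ab =>
            (pvDivisors (ab.2 - ab.1)).foldl
              (fun counts f => counts.insert f (counts.getD f 0 + 1)) counts) counts)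
      (PySem.Dict.empty : PySem.Dict Int Int)
      = PySem.Dict.counter
          (sequences.flatMap (fun sp => (pvDiffs sp.2).flatMap pvDivisors)) := by
  have hbody : (fun (counts : PySem.Dict Int Int) (sp : String × List Int) =>
      (sp.2.zip (PySem.List.slice sp.2 (some 1) none)).foldl
        (fun counts ab =>
          (pvDivisors (ab.2 - ab.1)).foldl
            (fun counts f => counts.insert f (counts.getD f 0 + 1)) counts) counts)
      = fun counts sp => ((pvDiffs sp.2).flatMap pvDivisors).foldl
          (fun counts f => counts.insert f (counts.getD f 0 + 1)) counts := by
    funext counts sp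
    rw [PySem.List.slice_from_one,
      pvFoldFlat (sp.2.zip sp.2.tail) (fun ab => pvDivisors (ab.2 - ab.1)) _ counts,
      pvDiffs, List.flatMap_map]
  rw [hbody]
  rw [pvFoldFlat sequences (fun sp => (pvDiffs sp.2).flatMap pvDivisors) _ _]
  exact PySem.Dict.foldl_insert_getD_add_one_eq_counter _

-- ===== VERDICT (by name: the statement is the Claim_ definition above) =====
theorem calculate_possible_key_lengths_spec : Claim_equal_calculate_possible_key_lengths := by
  intro sequences _
  show calculate_possible_key_lengths sequences = calculate_possible_key_lengths_alt sequences
  rw [calculate_possible_key_lengths, calculate_possible_key_lengths_alt]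
  simp only [pvDistances_eq sequences [], List.nil_append, pvCounts_eq sequences]
  have hbig : sequences.flatMap (fun sp => (pvDiffs sp.2).flatMap pvDivisors)
      = (sequences.flatMap (fun sp => pvDiffs sp.2)).flatMap pvFA := by
    rw [List.flatMap_assoc]
    refine List.flatMap_congr ?_
    intro sp _
    refine List.flatMap_congr ?_
    intro d _
    exact pvDivisors_eq_fA d
  rw [hbig]
  by_cases hnil : sequences.flatMap (fun sp => pvDiffs sp.2) = []
  · rw [if_pos hnil, hnil]
    rfl
  · rw [if_neg hnil, pvFactors_eq _ []]
    rfl
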